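-- pv_equiv track=rewrite | github.com/Futsukai/Python | DataStructures/Exam.py | anagram_solution
-- ===== SOURCE A (Python) =====
-- def anagram_solution(s1, s2):
--     """
--     清点法 O(n^2)
--     """
--     a_list = list(s2)
--     pos1 = 0
--     still_ok = True
--
--     while pos1 < len(s1) and still_ok:
--         pos2 = 0
--         found = False
--         while pos2 < len(a_list) and not found:
--             if s1[pos1] == a_list[pos2]:
--                 found = True
--             else:
--                 pos2 = pos2 + 1
--
--         if found:
--             a_list[pos2] = None
--         else:
--             still_ok = False
--         pos1 = pos1 + 1
--     return still_ok
-- ===== SOURCE B (Python) =====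
-- def anagram_solution(s1, s2):
--     """Counting re-implementation: s1's chars form a sub-multiset of s2's
--     iff every distinct char of s1 occurs in s2 at least as often."""
--     return all(s1.count(c) <= s2.count(c) for c in set(s1))
-- ===== Notes on version B (the rewrite author's own statement) =====
-- stated objective: faster
-- what changed: Replaces the nested find-and-mark scan over a mutable copy of s2 by a per-distinct-character count comparison (s1.count(c) <= s2.count(c) for c in set(s1)), removing the inner linear search and the None-marking state.
import Mathlib
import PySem

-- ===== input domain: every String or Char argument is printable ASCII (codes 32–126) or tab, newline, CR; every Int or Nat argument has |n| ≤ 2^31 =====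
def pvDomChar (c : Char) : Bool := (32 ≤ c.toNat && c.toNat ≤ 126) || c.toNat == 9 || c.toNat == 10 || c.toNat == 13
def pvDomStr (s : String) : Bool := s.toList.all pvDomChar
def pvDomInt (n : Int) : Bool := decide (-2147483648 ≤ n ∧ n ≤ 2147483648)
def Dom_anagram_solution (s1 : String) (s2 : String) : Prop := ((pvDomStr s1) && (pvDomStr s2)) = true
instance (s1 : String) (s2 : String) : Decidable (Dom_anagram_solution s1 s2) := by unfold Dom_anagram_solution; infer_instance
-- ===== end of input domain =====

-- B replaces A's nested find-and-mark scan by a per-distinct-character count comparison (faster; no mutable marking state).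

-- ===== PORT A =====
-- Inner while loop of A: scan a_list left to right for the first cell equal to s1[pos1]
-- (a consumed cell holds `none`, and in Python `c == None` is False, i.e. `x = some c` here);
-- if found, mark it None (found / a_list[pos2] = None), else report failure (none = not found).
def pvConsume (c : Char) : List (Option Char) → Option (List (Option Char))
  | [] => none
  | x :: xs => if x = some c then some (none :: xs) else (pvConsume c xs).map (x :: ·)

-- Outer while loop over pos1: still_ok stays true while every char is found and consumed.
def pvLoopA : List Char → List (Option Char) → Bool
  | [], _ => true
  | c :: rest, al =>
    match pvConsume c al with
    | some al' => pvLoopA rest al'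
    | none => false

def anagram_solution (s1 : String) (s2 : String) : Bool :=
  pvLoopA s1.toList (s2.toList.map some)

-- ===== PORT B =====
-- all(s1.count(c) <= s2.count(c) for c in set(s1)); str.count on a single char is char count.
def anagram_solution_alt (s1 : String) (s2 : String) : Bool :=
  (PySem.Set.ofList s1.toList).all (fun c => decide (s1.toList.count c ≤ s2.toList.count c))

-- ===== PRECONDITION & SPEC =====
def Spec_anagram_solution (s1 : String) (s2 : String) (out : Bool) : Prop := out = anagram_solution_alt s1 s2
instance (s1 : String) (s2 : String) (out : Bool) : Decidable (Spec_anagram_solution s1 s2 out) := by unfold Spec_anagram_solution; infer_instance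

-- ===== CLAIM (what is proved, stated in full; the proofs are below) =====
def Claim_equal_anagram_solution : Prop := ∀ (s1 : String) (s2 : String), Dom_anagram_solution s1 s2 → Spec_anagram_solution s1 s2 (anagram_solution s1 s2)

-- ===== LEMMAS AND PROOFS =====

theorem pvConsume_eq_none (c : Char) (al : List (Option Char)) :
    pvConsume c al = none ↔ some c ∉ al := by
  induction al with
  | nil => simp [pvConsume]
  | cons x xs ih =>
    simp only [pvConsume]
    by_cases hx : x = some c
    · simp [hx]
    · simp [hx, Option.map_eq_none_iff, ih, Ne.symm hx]

theorem pvConsume_count (c : Char) (al al' : List (Option Char))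
    (h : pvConsume c al = some al') :
    al'.count (some c) + 1 = al.count (some c) ∧
      ∀ d : Char, d ≠ c → al'.count (some d) = al.count (some d) := by
  induction al generalizing al' with
  | nil => simp [pvConsume] at h
  | cons x xs ih =>
    simp only [pvConsume] at h
    by_cases hx : x = some c
    · rw [if_pos hx] at h
      obtain rfl := Option.some.inj h
      subst hx
      constructor
      · simp [List.count_cons]
      · intro d hd
        simp [List.count_cons]
        exact Ne.symm hd
    · rw [if_neg hx, Option.map_eq_some_iff] at h
      obtain ⟨ys, hys, rfl⟩ := h
      obtain ⟨h1, h2⟩ := ih ys hys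
      constructor
      · simp only [List.count_cons]
        omega
      · intro d hd
        simp [List.count_cons, h2 d hd]

theorem pvLoopA_iff (l : List Char) (al : List (Option Char)) :
    pvLoopA l al = true ↔ ∀ c : Char, l.count c ≤ al.count (some c) := by
  induction l generalizing al with
  | nil => simp [pvLoopA]
  | cons c rest ih =>
    simp only [pvLoopA]
    cases h : pvConsume c al with
    | none =>
      rw [pvConsume_eq_none] at h
      have hc : al.count (some c) = 0 := List.count_eq_zero.mpr h
      simp only [Bool.false_eq_true, false_iff, not_forall, not_le]
      exact ⟨c, by simp [List.count_cons, hc]⟩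
    | some al' =>
      obtain ⟨h1, h2⟩ := pvConsume_count c al al' h
      rw [ih]
      constructor
      · intro hall d
        by_cases hd : d = c
        · subst hd
          have := hall d
          simp only [List.count_cons_self]
          omega
        · have := hall d
          rw [h2 d hd] at this
          have hcd : ¬ c = d := fun h => hd h.symm
          simpa [List.count_cons, hcd] using this
      · intro hall d
        by_cases hd : d = c
        · subst hd
          have := hall d
          simp only [List.count_cons_self] at this
          omega
        · have := hall d
          rw [h2 d hd]
          simp only [List.count_cons] at this
          simp only [beq_iff_eq] at this
          omega

theorem alt_iff (s1 s2 : String) :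
    anagram_solution_alt s1 s2 = true ↔
      ∀ c : Char, s1.toList.count c ≤ s2.toList.count c := by
  unfold anagram_solution_alt
  rw [List.all_eq_true]
  constructor
  · intro hall c
    by_cases hc : c ∈ s1.toList
    · have := hall c (by rw [PySem.Set.mem_ofList]; exact hc)
      simpa using this
    · simp [List.count_eq_zero.mpr hc]
  · intro h c hc
    simpa using h c

-- ===== VERDICT (by name: the statement is the Claim_ definition above) =====
theorem anagram_solution_spec : Claim_equal_anagram_solution := by
  intro s1 s2 _
  unfold Spec_anagram_solution anagram_solution
  have hA := pvLoopA_iff s1.toList (s2.toList.map some)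
  have hB := alt_iff s1 s2
  have hcount : ∀ c : Char, (s2.toList.map some).count (some c) = s2.toList.count c := by
    intro c
    exact List.count_map_of_injective _ some (fun a b => Option.some.inj) c
  simp only [hcount] at hA
  cases hb : anagram_solution_alt s1 s2
  · rw [Bool.eq_false_iff]
    intro hA'
    rw [hA] at hA'
    exact absurd (hB.mpr hA') (by simp [hb])
  · rw [hA]
    exact hB.mp hb
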